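-- pv_equiv track=rewrite | github.com/p1kalys/Geeksforgeeks-DSA-Vault | Ticket Counter - GFG/ticket-counter.py | distributeTicket
-- ===== SOURCE A (Python) =====
-- from collections import deque
--
-- def distributeTicket(N : int, K : int) -> int:
--     # Code Here
--     q=deque()
--     for i in range(1,N+1):
--         q.append(i)
--     flag=True
--     while q:
--         for j in range(K):
--             ans=q[-1]
--             if flag==True:
--                 q.popleft()
--             else:
--                 q.pop()
--             if len(q)==0:
--                 break
--
--         flag = not flag
--     return ans
-- ===== SOURCE B (Python) =====
-- def distributeTicket(N: int, K: int) -> int: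
--     # Two-pointer simulation: the queue is always a contiguous range [lo, hi];
--     # each alternating pass removes K people in O(1) by moving one pointer.
--     lo, hi, front = 1, N, True
--     while True:
--         if hi - lo + 1 <= K:
--             return hi if front else lo
--         if front:
--             lo += K
--         else:
--             hi -= K
--         front = not front
-- ===== Notes on version B (the rewrite author's own statement) =====
-- stated objective: faster
-- what changed: Replaces the deque with one-by-one pops by a two-pointer [lo,hi] range simulation that jumps K per alternating pass and reads the answer off the pointers.
import Mathlib
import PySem

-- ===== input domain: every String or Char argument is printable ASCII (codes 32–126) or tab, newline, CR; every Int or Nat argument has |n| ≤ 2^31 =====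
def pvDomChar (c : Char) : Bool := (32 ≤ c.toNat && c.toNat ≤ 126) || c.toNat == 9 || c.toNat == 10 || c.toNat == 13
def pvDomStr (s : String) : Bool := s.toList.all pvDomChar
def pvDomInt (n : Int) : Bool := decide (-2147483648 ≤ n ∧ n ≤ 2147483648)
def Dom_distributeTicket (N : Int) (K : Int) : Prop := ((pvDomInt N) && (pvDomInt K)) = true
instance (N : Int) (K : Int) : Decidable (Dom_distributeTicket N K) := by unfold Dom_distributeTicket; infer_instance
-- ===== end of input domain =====

-- B replaces A's O(N) one-by-one deque pops by a two-pointer range simulation jumping K per pass (O(N/K)).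

-- ===== PORT A =====
-- inner loop: `for j in range(K): ans = q[-1]; pop front/back; if empty: break`
-- (q[-1] is exact here: inside Pre_ the queue is nonempty at each read, so getD's default is never used)
def pvInnerA (k : Nat) (q : List Int) (ans : Int) (flag : Bool) : List Int × Int :=
  match k with
  | 0 => (q, ans)
  | Nat.succ k' =>
    let ans' := q.getLast?.getD ans
    let q' := if flag then q.drop 1 else q.dropLast
    if q'.isEmpty then (q', ans') else pvInnerA k' q' ans' flag

-- `while q:` — fuel bounds the iteration count (≥1 removal per iteration inside Pre_); ans starts unset in Python (Pre_ guarantees it is assigned before return)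
def pvWhileA (K : Int) (fuel : Nat) (q : List Int) (ans : Int) (flag : Bool) : Int :=
  match fuel with
  | 0 => ans
  | Nat.succ f =>
    if q.isEmpty then ans
    else
      let p := pvInnerA K.toNat q ans flag
      pvWhileA K f p.1 p.2 (!flag)

def distributeTicket (N : Int) (K : Int) : Int :=
  let q := (PySem.List.pyRange 1 (N+1) 1).foldl (fun q i => q ++ [i]) []
  pvWhileA K (N.toNat + 1) q 0 true

-- ===== PORT B =====
-- `while True:` of Source B, with fuel making it total (inside Pre_ the size shrinks by K ≥ 1 each pass)
def pvLoopB (K : Int) (fuel : Nat) (lo hi : Int) (front : Bool) : Int :=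
  match fuel with
  | 0 => 0
  | Nat.succ f =>
    if hi - lo + 1 ≤ K then (if front then hi else lo)
    else pvLoopB K f (if front then lo + K else lo) (if front then hi else hi - K) (!front)

def distributeTicket_alt (N : Int) (K : Int) : Int :=
  pvLoopB K (N.toNat + 1) 1 N true

-- ===== PRECONDITION & SPEC =====
-- Pre_ excludes exactly the inputs where A does not return: N ≤ 0 raises UnboundLocalError
-- (the while loop never runs, `ans` is unset) and K ≤ 0 loops forever (range(K) is empty).
def Pre_distributeTicket (N : Int) (K : Int) : Prop := 1 ≤ N ∧ 1 ≤ K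
instance (N : Int) (K : Int) : Decidable (Pre_distributeTicket N K) := by unfold Pre_distributeTicket; infer_instance
def pvWitness_distributeTicket : Int × Int := (5, 2)

def Spec_distributeTicket (N : Int) (K : Int) (out : Int) : Prop := out = distributeTicket_alt N K
instance (N : Int) (K : Int) (out : Int) : Decidable (Spec_distributeTicket N K out) := by unfold Spec_distributeTicket; infer_instance

-- ===== CLAIM (what is proved, stated in full; the proofs are below) =====
def Claim_equal_distributeTicket : Prop := ∀ (N : Int) (K : Int), Dom_distributeTicket N K → Pre_distributeTicket N K → Spec_distributeTicket N K (distributeTicket N K)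

-- ===== LEMMAS AND PROOFS =====

-- the queue is always the contiguous range [lo, hi)
def pvSeg (lo hi : Int) : List Int := PySem.List.pyRange lo hi 1

theorem pvSeg_nil {lo hi : Int} (h : hi ≤ lo) : pvSeg lo hi = [] :=
  PySem.List.pyRange_one_eq_nil h

theorem pvSeg_cons {lo hi : Int} (h : lo < hi) : pvSeg lo hi = lo :: pvSeg (lo+1) hi :=
  PySem.List.pyRange_one_cons h

theorem pvSeg_concat {lo hi : Int} (h : lo < hi) : pvSeg lo hi = pvSeg lo (hi-1) ++ [hi-1] := by
  have h' : lo ≤ hi - 1 := by omega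
  have := PySem.List.pyRange_one_succ_right h' (a := lo)
  simpa [pvSeg, show hi - 1 + 1 = hi by ring] using this

theorem pvSeg_ne_nil {lo hi : Int} (h : lo < hi) : pvSeg lo hi ≠ [] := by
  rw [pvSeg_cons h]; simp

theorem pvSeg_getLast {lo hi : Int} (h : lo < hi) (d : Int) :
    (pvSeg lo hi).getLast?.getD d = hi - 1 := by
  rw [pvSeg_concat h]; simp

theorem pvSeg_drop1 {lo hi : Int} (h : lo < hi) : (pvSeg lo hi).drop 1 = pvSeg (lo+1) hi := by
  rw [pvSeg_cons h]; simp

theorem pvSeg_dropLast {lo hi : Int} (h : lo < hi) :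
    (pvSeg lo hi).dropLast = pvSeg lo (hi-1) := by
  rw [pvSeg_concat h]; simp

-- one-step unfolding of pvInnerA (so rewriting does not dig into the recursive call)
theorem pvInnerA_succ (k : Nat) (q : List Int) (ans : Int) (flag : Bool) :
    pvInnerA (k+1) q ans flag =
      if ((if flag then q.drop 1 else q.dropLast)).isEmpty
      then ((if flag then q.drop 1 else q.dropLast), q.getLast?.getD ans)
      else pvInnerA k (if flag then q.drop 1 else q.dropLast) (q.getLast?.getD ans) flag := rfl

-- characterisation of A's inner K-pop loop on a contiguous queue
theorem pvInnerA_seg (k : Nat) (lo hi ans : Int) (flag : Bool) (h : lo < hi) :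
    pvInnerA (k+1) (pvSeg lo hi) ans flag =
      if hi - lo ≤ (k : Int) + 1 then ([], if flag then hi - 1 else lo)
      else if flag then (pvSeg (lo + (k:Int) + 1) hi, hi - 1)
           else (pvSeg lo (hi - (k:Int) - 1), hi - (k:Int) - 1) := by
  induction k generalizing lo hi ans flag with
  | zero =>
    rw [pvInnerA_succ]
    cases flag
    · simp only [Bool.false_eq_true, if_false, pvSeg_dropLast h, pvSeg_getLast h]
      by_cases he : hi - 1 ≤ lo
      · rw [pvSeg_nil he, if_pos List.isEmpty_nil, if_pos (show hi - lo ≤ ((0:Nat):Int) + 1 by push_cast; omega)]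
        simp only [Prod.mk.injEq, true_and]
        omega
      · have h2 : lo < hi - 1 := by omega
        rw [if_neg (by simp [pvSeg_ne_nil h2]), if_neg (show ¬ hi - lo ≤ ((0:Nat):Int) + 1 by push_cast; omega)]
        simp [pvInnerA]
    · simp only [if_true, pvSeg_drop1 h, pvSeg_getLast h]
      by_cases he : hi ≤ lo + 1
      · rw [pvSeg_nil he, if_pos List.isEmpty_nil, if_pos (show hi - lo ≤ ((0:Nat):Int) + 1 by push_cast; omega)]
      · have h2 : lo + 1 < hi := by omega
        rw [if_neg (by simp [pvSeg_ne_nil h2]), if_neg (show ¬ hi - lo ≤ ((0:Nat):Int) + 1 by push_cast; omega)]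
        simp only [pvInnerA, Prod.mk.injEq]
        norm_num
  | succ k ih =>
    rw [pvInnerA_succ]
    cases flag
    · -- flag = false: pop from back
      simp only [Bool.false_eq_true, if_false, pvSeg_dropLast h, pvSeg_getLast h]
      by_cases he : hi - 1 ≤ lo
      · rw [pvSeg_nil he, if_pos List.isEmpty_nil, if_pos (show hi - lo ≤ ((k+1:Nat):Int) + 1 by push_cast; omega)]
        simp only [Prod.mk.injEq, true_and]
        omega
      · have h2 : lo < hi - 1 := by omega
        rw [if_neg (by simp [pvSeg_ne_nil h2]), ih lo (hi-1) (hi-1) false h2]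
        by_cases hc : hi - lo ≤ ((k+1:Nat):Int) + 1
        · rw [if_pos (by push_cast at hc ⊢; omega), if_pos hc]
          simp
        · rw [if_neg (by push_cast at hc ⊢; omega), if_neg hc]
          simp only [Bool.false_eq_true, if_false]
          have e : hi - 1 - (k:Int) - 1 = hi - ((k+1:Nat):Int) - 1 := by push_cast; ring
          rw [e]
    · -- flag = true: pop from front
      simp only [if_true, pvSeg_drop1 h, pvSeg_getLast h]
      by_cases he : hi ≤ lo + 1
      · rw [pvSeg_nil he, if_pos List.isEmpty_nil, if_pos (show hi - lo ≤ ((k+1:Nat):Int) + 1 by push_cast; omega)]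
      · have h2 : lo + 1 < hi := by omega
        rw [if_neg (by simp [pvSeg_ne_nil h2]), ih (lo+1) hi (hi-1) true h2]
        by_cases hc : hi - lo ≤ ((k+1:Nat):Int) + 1
        · rw [if_pos (by push_cast at hc ⊢; omega), if_pos hc]
          simp
        · rw [if_neg (by push_cast at hc ⊢; omega), if_neg hc]
          simp only [if_true]
          have e : lo + 1 + (k:Int) + 1 = lo + ((k+1:Nat):Int) + 1 := by push_cast; ring
          rw [e]

theorem pvWhileA_nil (K : Int) (f : Nat) (ans : Int) (flag : Bool) :
    pvWhileA K f [] ans flag = ans := by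
  cases f <;> simp [pvWhileA]

-- main invariant: A's while loop on queue [lo,hi) computes what B's two-pointer loop computes
theorem pvWhileA_eq_pvLoopB (K : Int) (hK : 1 ≤ K) :
    ∀ (f : Nat) (lo hi ans : Int) (flag : Bool), lo < hi → (hi - lo).toNat ≤ f →
    pvWhileA K f (pvSeg lo hi) ans flag = pvLoopB K f lo (hi - 1) flag := by
  intro f
  induction f with
  | zero => intro lo hi ans flag h hf; omega
  | succ f ih =>
    intro lo hi ans flag h hf
    have hne : ¬ (pvSeg lo hi).isEmpty := by simp [List.isEmpty_iff, pvSeg_ne_nil h]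
    have hk : K.toNat = (K.toNat - 1) + 1 := by omega
    have hkc : ((K.toNat - 1 : Nat) : Int) + 1 = K := by omega
    simp only [pvWhileA, hne, if_false, Bool.false_eq_true]
    rw [hk, pvInnerA_seg _ lo hi ans flag h, hkc]
    by_cases hc : hi - lo ≤ K
    · rw [if_pos hc]
      cases flag <;> simp [pvWhileA_nil, pvLoopB, show hi - 1 - lo + 1 ≤ K by omega]
    · rw [if_neg hc]
      cases flag
      · -- back pass
        simp only [Bool.false_eq_true, if_false, Bool.not_false]
        have e : hi - ((K.toNat - 1 : Nat) : Int) - 1 = hi - K := by omega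
        rw [e, ih lo (hi - K) _ true (by omega) (by omega)]
        simp only [pvLoopB, if_neg (show ¬ hi - 1 - lo + 1 ≤ K by omega), Bool.not_false,
          Bool.false_eq_true, if_false]
        congr 1
        ring
      · -- front pass
        simp only [if_true, Bool.not_true]
        have e : lo + ((K.toNat - 1 : Nat) : Int) + 1 = lo + K := by omega
        rw [e, ih (lo + K) hi _ false (by omega) (by omega)]
        simp only [pvLoopB, if_neg (show ¬ hi - 1 - lo + 1 ≤ K by omega), if_true, Bool.not_true]

theorem pvFoldlAppend (xs : List Int) (acc : List Int) :
    xs.foldl (fun q i => q ++ [i]) acc = acc ++ xs := by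
  induction xs generalizing acc with
  | nil => simp
  | cons x xs ih => simp [List.foldl, ih]

-- ===== VERDICT (by name: the statement is the Claim_ definition above) =====
theorem distributeTicket_spec : Claim_equal_distributeTicket := by
  intro N K _ hPre
  obtain ⟨hN, hK⟩ := hPre
  unfold Spec_distributeTicket distributeTicket distributeTicket_alt
  rw [pvFoldlAppend]
  have h1 : (1:Int) < N + 1 := by omega
  have := pvWhileA_eq_pvLoopB K hK (N.toNat + 1) 1 (N+1) 0 true h1 (by omega)
  simpa [pvSeg] using this
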